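-- pv_equiv track=rewrite | github.com/SabareesanArjunasamy/leetcode-daily-challenge | zigZagTraverssal.py | zigzagTraverse
-- ===== SOURCE A (Python) =====
-- def generateStartingIndices(n,m):
--     indices = [(0,0)]
--     while indices[-1][1]!=m:
--         indices.append((0,indices[-1][1]+1))
--     while indices[-1][0]!=n:
--         indices.append((indices[-1][0]+1,m))
--     return indices
--
-- def generatePattern(i,j):
--     indices = [(i,j)]
--     while indices[-1][1]!=0:
--         le = indices[-1]
--         indices.append((le[0]+1,le[1]-1))
--     return indices
--
-- def zigzagTraverse(array):
--     m = len(array)-1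
--     n = len(array[0])-1
--     start_indices = generateStartingIndices(m,n)
--     final_indices = []
--
--     for i in range(len(start_indices)):
--         e = start_indices[i]
--         seq = generatePattern(e[0],e[1])
--         if i%2!=0: seq.reverse()
--         final_indices.extend(seq)
--
--     res = []
--     for e in final_indices:
--         i, j = e
--         if i<=m and j<=n:
--             res.append(array[i][j])
--     return res
-- ===== SOURCE B (Python) =====
-- def zigzagTraverse(array):
--     m = len(array) - 1
--     n = len(array[0]) - 1
--     res = []
--     for d in range(m + n + 1):
--         lo = max(0, d - n)
--         hi = min(m, d)
--         cells = range(lo, hi + 1)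
--         if d % 2 != 0:
--             cells = reversed(cells)
--         for i in cells:
--             res.append(array[i][d - i])
--     return res
-- ===== Notes on version B (the rewrite author's own statement) =====
-- stated objective: faster
-- what changed: B iterates over the m+n-1 anti-diagonals and generates only the in-bounds cells of each (an index range max(0,d-n)..min(m,d), reversed on odd diagonals), instead of A's building every start index, extending every diagonal all the way to column 0 regardless of bounds, concatenating all candidate indices and then filtering them against the matrix bounds.
import Mathlib
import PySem

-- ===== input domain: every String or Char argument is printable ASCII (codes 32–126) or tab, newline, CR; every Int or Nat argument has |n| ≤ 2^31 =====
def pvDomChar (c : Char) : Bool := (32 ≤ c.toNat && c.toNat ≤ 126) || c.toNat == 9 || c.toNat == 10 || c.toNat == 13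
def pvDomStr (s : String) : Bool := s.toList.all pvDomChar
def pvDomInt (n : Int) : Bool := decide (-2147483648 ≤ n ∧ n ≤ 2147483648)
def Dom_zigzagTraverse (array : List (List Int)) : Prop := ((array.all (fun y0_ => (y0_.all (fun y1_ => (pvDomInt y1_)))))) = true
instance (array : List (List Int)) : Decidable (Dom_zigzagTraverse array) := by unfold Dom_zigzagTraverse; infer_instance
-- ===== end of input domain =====

-- B generates only the in-bounds cells of each anti-diagonal directly (O(m·n)) instead of
-- A's generate-everything-then-filter; equivalence is about the return value on Pre_.

-- ===== PORT A =====
-- first while-loop of generateStartingIndices: appends (0, j+1) while last col ≠ m;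
-- fuel is the exact loop count (m - j).toNat, and the '<' guard only totalises the loop
-- (Python diverges when the column overshoots m, outside Pre_)
def gsiCols : Int → Nat → Int → List (Int × Int)
  | _, 0, _ => []
  | m, Nat.succ f, j => if j < m then (0, j + 1) :: gsiCols m f (j + 1) else []

-- second while-loop: appends (i+1, m) while last row ≠ n (same exact fuel and totalising guard)
def gsiRows : Int → Nat → Int → Int → List (Int × Int)
  | _, 0, _, _ => []
  | n, Nat.succ f, i, m => if i < n then (i + 1, m) :: gsiRows n f (i + 1) m else []

def generateStartingIndices (n m : Int) : List (Int × Int) :=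
  ((0, 0) :: gsiCols m m.toNat 0) ++ gsiRows n n.toNat 0 m

-- while-loop of generatePattern: appends (i+1, j-1) while last col ≠ 0 (fuel = exact loop
-- count j.toNat; the guard 0 < j only totalises — Python diverges for negative j, outside Pre_)
def genPat : Nat → Int → Int → List (Int × Int)
  | 0, _, _ => []
  | Nat.succ f, i, j => if 0 < j then (i + 1, j - 1) :: genPat f (i + 1) (j - 1) else []

def generatePattern (i j : Int) : List (Int × Int) := (i, j) :: genPat j.toNat i j

def zigzagTraverse (array : List (List Int)) : List Int :=
  let m : Int := (array.length : Int) - 1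
  let n : Int := ((array.headD []).length : Int) - 1  -- array[0]; empty array (IndexError) is outside Pre_
  let si := generateStartingIndices m n
  let final := (PySem.List.enumerate si).foldl
    (fun acc ie =>
      let seq := generatePattern ie.2.1 ie.2.2
      acc ++ (if PySem.Int.mod ie.1 2 ≠ 0 then seq.reverse else seq)) []
  -- array[i][j]: in bounds for every visited cell under Pre_, so pyGetD is exact here
  final.foldl
    (fun acc p =>
      if p.1 ≤ m ∧ p.2 ≤ n then
        acc ++ [PySem.List.pyGetD (PySem.List.pyGetD array p.1 []) p.2 0]
      else acc) []

-- ===== PORT B =====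
def zigzagTraverse_alt (array : List (List Int)) : List Int :=
  let m : Int := (array.length : Int) - 1
  let n : Int := ((array.headD []).length : Int) - 1  -- array[0]; empty array is outside Pre_
  (PySem.List.pyRange 0 (m + n + 1) 1).foldl
    (fun res d =>
      let lo := max 0 (d - n)
      let hi := min m d
      let base := PySem.List.pyRange lo (hi + 1) 1
      let cells := if PySem.Int.mod d 2 ≠ 0 then base.reverse else base
      cells.foldl
        (fun r i => r ++ [PySem.List.pyGetD (PySem.List.pyGetD array i []) (d - i) 0]) res)
    []

-- ===== PRECONDITION & SPEC =====
-- Pre_ excludes exactly the inputs where A does not return: the empty array (IndexError on array[0]),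
-- an empty first row (A's first while-loop diverges), and rows shorter than the first row
-- (IndexError on array[i][j]); rows longer than the first row are fine and admitted.
def Pre_zigzagTraverse (array : List (List Int)) : Prop :=
  array ≠ [] ∧ (array.headD []) ≠ [] ∧ ∀ row ∈ array, (array.headD []).length ≤ row.length
instance (array : List (List Int)) : Decidable (Pre_zigzagTraverse array) := by
  unfold Pre_zigzagTraverse; infer_instance

def pvWitness_zigzagTraverse : List (List Int) := [[1, 2, 3], [4, 5, 6], [7, 8, 9]]

def Spec_zigzagTraverse (array : List (List Int)) (out : List Int) : Prop := out = zigzagTraverse_alt array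
instance (array : List (List Int)) (out : List Int) : Decidable (Spec_zigzagTraverse array out) := by unfold Spec_zigzagTraverse; infer_instance

-- ===== CLAIM (what is proved, stated in full; the proofs are below) =====
def Claim_equal_zigzagTraverse : Prop := ∀ (array : List (List Int)), Dom_zigzagTraverse array → Pre_zigzagTraverse array → Spec_zigzagTraverse array (zigzagTraverse array)

-- ===== LEMMAS AND PROOFS =====

-- the first while-loop produces the remaining top-row starts (0, j+1) … (0, m)
theorem gsiCols_eq (m : Int) (fuel : Nat) (j : Int) (hf : (m - j).toNat ≤ fuel) :
    gsiCols m fuel j = (PySem.List.pyRange (j + 1) (m + 1) 1).map (fun c => ((0 : Int), c)) := by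
  induction fuel generalizing j with
  | zero =>
    rw [PySem.List.pyRange_one_eq_nil (by omega)]
    rfl
  | succ f ih =>
    simp only [gsiCols]
    by_cases h : j < m
    · rw [if_pos h, ih (j + 1) (by omega),
          PySem.List.pyRange_one_cons (by omega : j + 1 < m + 1)]
      rfl
    · rw [if_neg h, PySem.List.pyRange_one_eq_nil (by omega)]
      rfl

-- the second while-loop produces the right-column starts (i+1, m) … (n, m)
theorem gsiRows_eq (n : Int) (fuel : Nat) (i m : Int) (hf : (n - i).toNat ≤ fuel) :
    gsiRows n fuel i m = (PySem.List.pyRange (i + 1) (n + 1) 1).map (fun r => (r, m)) := by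
  induction fuel generalizing i with
  | zero =>
    rw [PySem.List.pyRange_one_eq_nil (by omega)]
    rfl
  | succ f ih =>
    simp only [gsiRows]
    by_cases h : i < n
    · rw [if_pos h, ih (i + 1) (by omega),
          PySem.List.pyRange_one_cons (by omega : i + 1 < n + 1)]
      rfl
    · rw [if_neg h, PySem.List.pyRange_one_eq_nil (by omega)]
      rfl

-- the diagonal pattern from (i, j): cells (r, i+j-r) for r = i … i+j
theorem genPat_eq (fuel : Nat) (i j : Int) (hj : 0 ≤ j) (hf : j.toNat ≤ fuel) :
    genPat fuel i j = (PySem.List.pyRange (i + 1) (i + j + 1) 1).map (fun r => (r, i + j - r)) := by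
  induction fuel generalizing i j with
  | zero =>
    rw [PySem.List.pyRange_one_eq_nil (by omega)]
    rfl
  | succ f ih =>
    simp only [genPat]
    by_cases h : 0 < j
    · rw [if_pos h, PySem.List.pyRange_one_cons (by omega : i + 1 < i + j + 1),
          ih (i + 1) (j - 1) (by omega) (by omega),
          show i + 1 + (j - 1) + 1 = i + j + 1 from by ring]
      simp only [List.map_cons]
      congr 1
      · rw [Prod.mk.injEq]; omega
      · exact List.map_congr_left (fun r _ => by rw [Prod.mk.injEq]; omega)
    · rw [if_neg h, PySem.List.pyRange_one_eq_nil (by omega)]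
      rfl

theorem generatePattern_eq (i j : Int) (hj : 0 ≤ j) :
    generatePattern i j = (PySem.List.pyRange i (i + j + 1) 1).map (fun r => (r, i + j - r)) := by
  rw [generatePattern, PySem.List.pyRange_one_cons (by omega : i < i + j + 1),
      genPat_eq j.toNat i j hj (le_refl _)]
  simp

-- the starting cell of diagonal d in A's start list
def diagStart (N d : Int) : Int × Int := if d ≤ N then (0, d) else (d - N, N)

theorem startIndices_eq (M N : Int) (hM : 0 ≤ M) (hN : 0 ≤ N) :
    generateStartingIndices M N = (PySem.List.pyRange 0 (M + N + 1) 1).map (diagStart N) := by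
  rw [generateStartingIndices, gsiCols_eq N N.toNat 0 (by omega), gsiRows_eq M M.toNat 0 N (by omega),
      PySem.List.pyRange_one_append 0 (N + 1) (M + N + 1) (by omega) (by omega), List.map_append]
  congr 1
  · rw [PySem.List.pyRange_one_cons (by omega : (0:Int) < N + 1)]
    simp only [List.map_cons]
    congr 1
    · simp only [diagStart]
      rw [if_pos hN]
    · apply List.map_congr_left
      intro c hc
      rw [PySem.List.mem_pyRange_one] at hc
      simp only [diagStart]
      rw [if_pos (by omega : c ≤ N)]
  · simp only [zero_add]
    rw [PySem.List.pyRange_one 1 (M + 1), PySem.List.pyRange_one (N + 1) (M + N + 1)]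
    have : (M + 1 - 1).toNat = (M + N + 1 - (N + 1)).toNat := by omega
    rw [this]
    simp only [List.map_map]
    apply List.map_congr_left
    intro k _
    simp only [Function.comp_apply, diagStart]
    rw [if_neg (by omega)]
    rw [Prod.mk.injEq]
    omega

-- enumerating a list mapped from range 0..K pairs each element with its own d
theorem enumerate_map_pyRange {α : Type} (f : Int → α) (a b : Int) :
    PySem.List.enumerate ((PySem.List.pyRange a b 1).map f) a
      = (PySem.List.pyRange a b 1).map (fun d => (d, f d)) := by
  by_cases h : a < b
  · rw [PySem.List.pyRange_one_cons h]
    simp only [List.map_cons, PySem.List.enumerate_cons]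
    rw [enumerate_map_pyRange f (a + 1) b]
  · rw [PySem.List.pyRange_one_eq_nil (by omega)]
    rfl
termination_by (b - a).toNat
decreasing_by all_goals omega

-- a ≤-filter truncates an increasing integer range
theorem filter_pyRange_le (a b M : Int) :
    (PySem.List.pyRange a b 1).filter (fun r => decide (r ≤ M))
      = PySem.List.pyRange a (min b (M + 1)) 1 := by
  by_cases h : a < b
  · rw [PySem.List.pyRange_one_cons h, List.filter_cons]
    by_cases ha : a ≤ M
    · rw [filter_pyRange_le (a + 1) b M]
      simp [ha, PySem.List.pyRange_one_cons (show a < min b (M + 1) by omega)]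
    · rw [filter_pyRange_le (a + 1) b M]
      simp [ha, PySem.List.pyRange_one_eq_nil (show min b (M + 1) ≤ a by omega),
            PySem.List.pyRange_one_eq_nil (show min b (M + 1) ≤ a + 1 by omega)]
  · rw [PySem.List.pyRange_one_eq_nil (by omega),
        PySem.List.pyRange_one_eq_nil (show min b (M + 1) ≤ a by omega)]
    rfl
termination_by (b - a).toNat
decreasing_by all_goals omega

-- per-diagonal: A's filtered pattern is exactly B's in-bounds index run
theorem diag_filter_eq (M N d : Int) (hN : 0 ≤ N) (hd : 0 ≤ d) (v : Int × Int → Int) :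
    ((generatePattern (diagStart N d).1 (diagStart N d).2).filter
        (fun p => decide (p.1 ≤ M ∧ p.2 ≤ N))).map v
      = (PySem.List.pyRange (max 0 (d - N)) (min M d + 1) 1).map (fun i => v (i, d - i)) := by
  have h1 : (diagStart N d).1 = max 0 (d - N) := by
    simp only [diagStart]; split <;> simp only [] <;> omega
  have h2 : 0 ≤ (diagStart N d).2 := by
    simp only [diagStart]; split <;> simp only [] <;> omega
  have h3 : (diagStart N d).1 + (diagStart N d).2 = d := by
    simp only [diagStart]; split <;> simp only [] <;> omega
  rw [generatePattern_eq _ _ h2, List.filter_map, List.map_map, h3]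
  have hfc : ((PySem.List.pyRange (diagStart N d).1 (d + 1) 1).filter
        ((fun p : Int × Int => decide (p.1 ≤ M ∧ p.2 ≤ N)) ∘ (fun r => (r, d - r))))
      = (PySem.List.pyRange (diagStart N d).1 (d + 1) 1).filter (fun r => decide (r ≤ M)) := by
    apply List.filter_congr
    intro r hr
    rw [PySem.List.mem_pyRange_one] at hr
    simp only [Function.comp]
    have : d - r ≤ N := by omega
    simp [this]
  rw [hfc, filter_pyRange_le]
  have : min (d + 1) (M + 1) = min M d + 1 := by omega
  rw [this, h1]
  rfl

-- the two folds agree diagonal by diagonal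
theorem zz_core (array : List (List Int)) (hne : array ≠ [])
    (hrow : (array.headD []) ≠ []) :
    zigzagTraverse array = zigzagTraverse_alt array := by
  unfold zigzagTraverse zigzagTraverse_alt
  simp only []
  set M : Int := (array.length : Int) - 1 with hMdef
  set N : Int := ((array.headD []).length : Int) - 1 with hNdef
  have hM : 0 ≤ M := by
    have : 0 < array.length := List.length_pos_of_ne_nil hne
    omega
  have hN : 0 ≤ N := by
    have : 0 < (array.headD []).length := List.length_pos_of_ne_nil hrow
    omega
  rw [startIndices_eq M N hM hN, enumerate_map_pyRange (diagStart N) 0 (M + N + 1)]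
  rw [PySem.List.foldl_append_eq_flatMap
        (fun ie : Int × (Int × Int) =>
          if PySem.Int.mod ie.1 2 ≠ 0 then (generatePattern ie.2.1 ie.2.2).reverse
          else generatePattern ie.2.1 ie.2.2)]
  rw [List.flatMap_map, List.nil_append]
  have hbody : ∀ (final : List (Int × Int)),
      final.foldl (fun acc p =>
        if p.1 ≤ M ∧ p.2 ≤ N then
          acc ++ [PySem.List.pyGetD (PySem.List.pyGetD array p.1 []) p.2 0]
        else acc) []
      = (final.filter (fun p => decide (p.1 ≤ M ∧ p.2 ≤ N))).map
          (fun p => PySem.List.pyGetD (PySem.List.pyGetD array p.1 []) p.2 0) := by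
    intro final
    have := PySem.List.foldl_append_if (fun p : Int × Int => decide (p.1 ≤ M ∧ p.2 ≤ N))
      (fun p => PySem.List.pyGetD (PySem.List.pyGetD array p.1 []) p.2 0) final []
    simpa using this
  rw [hbody, List.filter_flatMap, List.map_flatMap]
  -- B side: inner foldl is an append of a map, outer foldl is a flatMap
  have hB : ∀ (l : List Int) (init : List Int),
      l.foldl (fun res d =>
        (if PySem.Int.mod d 2 ≠ 0
          then (PySem.List.pyRange (max 0 (d - N)) (min M d + 1) 1).reverse
          else PySem.List.pyRange (max 0 (d - N)) (min M d + 1) 1).foldl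
          (fun r i => r ++ [PySem.List.pyGetD (PySem.List.pyGetD array i []) (d - i) 0]) res) init
      = init ++ l.flatMap (fun d =>
          (if PySem.Int.mod d 2 ≠ 0
            then (PySem.List.pyRange (max 0 (d - N)) (min M d + 1) 1).reverse
            else PySem.List.pyRange (max 0 (d - N)) (min M d + 1) 1).map
            (fun i => PySem.List.pyGetD (PySem.List.pyGetD array i []) (d - i) 0)) := by
    intro l
    induction l with
    | nil => intro init; simp
    | cons d rest ih =>
      intro init
      simp only [List.foldl_cons, List.flatMap_cons, ih, PySem.List.foldl_append_singleton_eq_map]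
      simp [ih, List.append_assoc, List.flatMap_def]
  rw [hB, List.nil_append]
  apply List.flatMap_congr  -- or congr on members
  intro d hd
  rw [PySem.List.mem_pyRange_one] at hd
  by_cases hpar : PySem.Int.mod d 2 ≠ 0
  · rw [if_pos hpar, if_pos hpar, List.filter_reverse, List.map_reverse, List.map_reverse,
        diag_filter_eq M N d hN (by omega)]
  · rw [if_neg hpar, if_neg hpar, diag_filter_eq M N d hN (by omega)]

-- ===== VERDICT (by name: the statement is the Claim_ definition above) =====
theorem zigzagTraverse_spec : Claim_equal_zigzagTraverse := by
  intro array _hdom hpre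
  unfold Spec_zigzagTraverse
  exact zz_core array hpre.1 hpre.2.1
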